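-- pv_equiv track=rewrite | github.com/dbonadiman/Extended-Projects | Numbers/Fibonacci/fibonacci.py | fibonacci_dyprogramming
-- ===== SOURCE A (Python) =====
-- def fibonacci_dyprogramming(n):
--     """
--     Fibonacci in dynamic programming way.
--
--     >>> fibonacci_dyprogramming(3)
--     [0, 1, 1, 2, 3]
--
--     >>> fibonacci_dyprogramming(0)
--     [0]
--     """
--     fib_sequence = []
--     if n > -1:
--         fib_sequence.append(0)
--     if n > 0:
--         fib_sequence.append(1)
--         while True:
--             fib_sequence.append(fib_sequence[-1]+fib_sequence[-2])
--             if fib_sequence[-1] > n: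
--                 fib_sequence.pop()
--                 break
--     return fib_sequence
-- ===== SOURCE B (Python) =====
-- def _fib_pair(i):
--     """(F(i), F(i+1)) by fast doubling."""
--     if i == 0:
--         return (0, 1)
--     a, b = _fib_pair(i // 2)
--     c = a * (2 * b - a)
--     d = a * a + b * b
--     if i % 2 == 0:
--         return (c, d)
--     return (d, c + d)
--
-- def fibonacci_dyprogramming(n):
--     result = []
--     i = 0
--     while True:
--         f = _fib_pair(i)[0]
--         if f > n:
--             return result
--         result.append(f)
--         i += 1
-- ===== Notes on version B (the rewrite author's own statement) =====
-- stated objective: alternative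
-- what changed: B enumerates Fibonacci numbers by index, computing each F(i) independently with the fast-doubling identities (F(2m)=F(m)(2F(m+1)-F(m)), F(2m+1)=F(m)^2+F(m+1)^2) via recursion on i//2, instead of A's bottom-up list extension that reads the last two list elements and fixes the overshoot with append-then-pop.
import Mathlib
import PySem

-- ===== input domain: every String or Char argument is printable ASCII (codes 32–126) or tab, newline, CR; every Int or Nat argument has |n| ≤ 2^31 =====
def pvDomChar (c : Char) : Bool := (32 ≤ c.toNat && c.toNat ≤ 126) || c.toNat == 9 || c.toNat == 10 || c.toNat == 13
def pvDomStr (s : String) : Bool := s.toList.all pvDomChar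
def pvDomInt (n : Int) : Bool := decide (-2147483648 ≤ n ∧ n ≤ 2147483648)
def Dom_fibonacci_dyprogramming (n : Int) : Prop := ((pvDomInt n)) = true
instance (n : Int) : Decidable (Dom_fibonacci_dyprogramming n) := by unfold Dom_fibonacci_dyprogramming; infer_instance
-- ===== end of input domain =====

-- B enumerates Fibonacci numbers by index, computing each F(i) independently by the
-- fast-doubling identities, instead of A's bottom-up list extension with an
-- append-then-pop sentinel (objective: alternative).

-- ===== PORT A =====
-- A's 'while True' loop over the growing list; fuel is a totality guard only
-- (n.toNat + 2 steps always suffice, since the appended values grow by at least 1).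
-- fib_sequence[-1] / fib_sequence[-2] are PySem.List.pyGet? (always in range here: len ≥ 2),
-- and .pop() on the (nonempty) list is dropLast.
def fibLoopA (fuel : Nat) (n : Int) (seq : List Int) : List Int :=
  match fuel with
  | 0 => seq
  | f + 1 =>
    let next := (PySem.List.pyGet? seq (-1)).getD 0 + (PySem.List.pyGet? seq (-2)).getD 0
    let seq' := seq ++ [next]
    if next > n then seq'.dropLast else fibLoopA f n seq'

def fibonacci_dyprogramming (n : Int) : List Int :=
  let s0 : List Int := []
  let s1 := if n > -1 then s0 ++ [0] else s0
  if n > 0 then fibLoopA (n.toNat + 2) n (s1 ++ [1]) else s1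

-- ===== PORT B =====
-- _fib_pair(i) = (F(i), F(i+1)) by fast doubling, recursion on i // 2; the extra
-- fuel argument (= i at the top call) is a structural-recursion guard only, it is
-- never exhausted since the recursion depth is at most i.
def fibPairB (fuel i : Nat) : Int × Int :=
  match fuel with
  | 0 => (0, 1)
  | f + 1 =>
    if i = 0 then (0, 1)
    else
      let p := fibPairB f (i / 2)
      let c := p.1 * (2 * p.2 - p.1)
      let d := p.1 * p.1 + p.2 * p.2
      if i % 2 == 0 then (c, d) else (d, c + d)

-- B's 'while True' loop over the index i; fuel is a totality guard only
-- (n.toNat + 4 iterations always suffice, since F(i) ≥ i - 1).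
def fibLoopB (fuel : Nat) (n : Int) (i : Nat) (acc : List Int) : List Int :=
  match fuel with
  | 0 => acc
  | f + 1 =>
    let fv := (fibPairB i i).1
    if fv > n then acc else fibLoopB f n (i + 1) (acc ++ [fv])

def fibonacci_dyprogramming_alt (n : Int) : List Int :=
  fibLoopB (n.toNat + 4) n 0 []

-- ===== PRECONDITION & SPEC =====
def Spec_fibonacci_dyprogramming (n : Int) (out : List Int) : Prop := out = fibonacci_dyprogramming_alt n
instance (n : Int) (out : List Int) : Decidable (Spec_fibonacci_dyprogramming n out) := by unfold Spec_fibonacci_dyprogramming; infer_instance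

-- ===== CLAIM (what is proved, stated in full; the proofs are below) =====
def Claim_equal_fibonacci_dyprogramming : Prop := ∀ (n : Int), Dom_fibonacci_dyprogramming n → Spec_fibonacci_dyprogramming n (fibonacci_dyprogramming n)

-- ===== LEMMAS AND PROOFS =====

-- Common reference chain both loops are reduced to: the values a, b, a+b, … while ≤ n.
def chainFib (fuel : Nat) (n a b : Int) : List Int :=
  match fuel with
  | 0 => []
  | f + 1 => if a ≤ n then a :: chainFib f n b (a + b) else []

-- fast doubling is correct: fibPairB computes (F(i), F(i+1)) whenever fuel ≥ i
lemma fibPairB_eq (fuel : Nat) : ∀ i : Nat, i ≤ fuel →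
    fibPairB fuel i = ((Nat.fib i : Int), (Nat.fib (i + 1) : Int)) := by
  induction fuel with
  | zero => intro i hi; interval_cases i; simp [fibPairB]
  | succ f ih =>
    intro i hi
    rw [fibPairB]
    by_cases h0 : i = 0
    · simp [h0]
    · have hm : i / 2 ≤ f := by omega
      simp only [if_neg h0, ih (i / 2) hm]
      have hle : Nat.fib (i / 2) ≤ 2 * Nat.fib (i / 2 + 1) :=
        le_trans Nat.fib_le_fib_succ (by omega)
      by_cases hp : i % 2 = 0
      · have hi2 : i = 2 * (i / 2) := by omega
        have h1 : Nat.fib i = Nat.fib (i / 2) * (2 * Nat.fib (i / 2 + 1) - Nat.fib (i / 2)) := by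
          conv_lhs => rw [hi2]
          exact Nat.fib_two_mul _
        have h2 : Nat.fib (i + 1) = Nat.fib (i / 2 + 1) ^ 2 + Nat.fib (i / 2) ^ 2 := by
          conv_lhs => rw [hi2]
          exact Nat.fib_two_mul_add_one _
        have hb : (i % 2 == 0) = true := by simpa using hp
        simp only [hb, if_true, h1, h2, Prod.mk.injEq]
        push_cast [Nat.cast_sub hle]
        constructor <;> ring
      · have hi2 : i = 2 * (i / 2) + 1 := by omega
        have h1 : Nat.fib i = Nat.fib (i / 2 + 1) ^ 2 + Nat.fib (i / 2) ^ 2 := by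
          conv_lhs => rw [hi2]
          exact Nat.fib_two_mul_add_one _
        have h2 : Nat.fib (i + 1) = Nat.fib (2 * (i / 2)) + Nat.fib i := by
          conv_lhs => rw [show i + 1 = 2 * (i / 2) + 2 by omega]
          rw [Nat.fib_add_two, ← hi2]
        have h3 : Nat.fib (2 * (i / 2)) =
            Nat.fib (i / 2) * (2 * Nat.fib (i / 2 + 1) - Nat.fib (i / 2)) := Nat.fib_two_mul _
        have hb : (i % 2 == 0) = false := by simpa using hp
        simp only [hb, h2, h3, h1]
        rw [Prod.mk.injEq]
        push_cast [Nat.cast_sub hle]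
        constructor <;> ring

-- B's loop is chainFib starting at (F(i), F(i+1))
lemma loopB_chain (fuel : Nat) (n : Int) : ∀ (i : Nat) (acc : List Int),
    fibLoopB fuel n i acc = acc ++ chainFib fuel n (Nat.fib i) (Nat.fib (i + 1)) := by
  induction fuel with
  | zero => intro i acc; simp [fibLoopB, chainFib]
  | succ f ih =>
    intro i acc
    simp only [fibLoopB, chainFib, fibPairB_eq i i le_rfl]
    by_cases h : (Nat.fib i : Int) > n
    · simp [h, show ¬ ((Nat.fib i : Int) ≤ n) by omega]
    · have h' : (Nat.fib i : Int) ≤ n := by omega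
      simp only [if_neg h, if_pos h', ih]
      have : (Nat.fib i : Int) + (Nat.fib (i + 1) : Int) = (Nat.fib (i + 2) : Int) := by
        push_cast [Nat.fib_add_two]; ring
      rw [this]
      simp

lemma pyGet_neg_two_append (acc : List Int) (a b : Int) :
    PySem.List.pyGet? (acc ++ [a, b]) (-2) = some a := by
  rw [show acc ++ [a, b] = (acc ++ [a]) ++ [b] by simp]
  rw [PySem.List.pyGet?_neg_ofNat _ 2 (by omega) (by simp)]
  simp

-- A's loop state (list ending in a, b) versus the reference chain
lemma loopA_chain (fuel : Nat) (n : Int) :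
    ∀ (acc : List Int) (a b : Int),
    fibLoopA fuel n (acc ++ [a, b]) = acc ++ a :: b :: chainFib fuel n (a + b) (b + (a + b)) := by
  induction fuel with
  | zero => intro acc a b; simp [fibLoopA, chainFib]
  | succ f ih =>
    intro acc a b
    simp only [fibLoopA, chainFib, PySem.List.pyGet?_neg_one, pyGet_neg_two_append]
    have hlast : (acc ++ [a, b]).getLast? = some b := by
      simp [List.getLast?_append]
    rw [hlast]
    simp only [Option.getD_some]
    by_cases h : b + a > n
    · simp [h, show ¬ (a + b ≤ n) by omega]
    · have h' : a + b ≤ n := by omega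
      simp only [h, if_pos h']
      have : acc ++ [a, b] ++ [b + a] = (acc ++ [a]) ++ [b, b + a] := by simp
      rw [this, ih (acc ++ [a]) b (b + a)]
      simp only [List.append_assoc, List.cons_append, List.nil_append]
      ring_nf
      simp

-- ===== VERDICT (by name: the statement is the Claim_ definition above) =====
theorem fibonacci_dyprogramming_spec : Claim_equal_fibonacci_dyprogramming := by
  intro n _
  unfold Spec_fibonacci_dyprogramming fibonacci_dyprogramming fibonacci_dyprogramming_alt
  rw [loopB_chain]
  by_cases hp : n > 0
  · simp only [if_pos hp, if_pos (by omega : n > -1)]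
    have : ([] : List Int) ++ [0] ++ [1] = ([] : List Int) ++ [(0 : Int), 1] := by simp
    rw [this, loopA_chain]
    have h4 : n.toNat + 4 = (n.toNat + 2) + 2 := by omega
    rw [h4]
    simp [chainFib, show (0 : Int) ≤ n by omega, show (1 : Int) ≤ n by omega, Nat.fib]
  · by_cases h0 : n = 0
    · subst h0; simp [chainFib, Nat.fib]
    · have hn : n < 0 := by omega
      simp [if_neg (by omega : ¬ n > -1), if_neg hp, chainFib,
        show ¬ (0 : Int) ≤ n by omega, show n.toNat = 0 from Int.toNat_of_nonpos (by omega),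
        Nat.fib]
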